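-- pv_equiv track=rewrite | github.com/sidmishraw/cs-267-project | apriori/build_tables.py | determine_word_positions
-- ===== SOURCE A (Python) =====
-- from collections import defaultdict, OrderedDict
--
-- def determine_word_positions(words):
--     """
--     Input is a list of words from a doc.
--     Outputs dict of word-[positions] key-value pair dict.
--     """
--     keyword_positions = []
--     cntr = 1
--     for word in words:
--         keyword_positions.append( (word, cntr) )
--         cntr += 1
--     term_positions = defaultdict(list)
--     for (key, value) in keyword_positions:
--         term_positions[key].append(value)
--     return sorted(term_positions.items())
-- ===== SOURCE B (Python) =====
-- def determine_word_positions(words):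
--     """
--     Input is a list of words from a doc.
--     Outputs sorted list of (word, [1-based positions]) pairs.
--     """
--     return [(w, [i for i, x in enumerate(words, 1) if x == w])
--             for w in sorted(set(words))]
-- ===== Notes on version B (the rewrite author's own statement) =====
-- stated objective: idiomatic
-- what changed: Replaced the two accumulation loops and defaultdict with a single comprehension: sort the distinct words and collect each word's 1-based positions directly from enumerate(words, 1).
import Mathlib
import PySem

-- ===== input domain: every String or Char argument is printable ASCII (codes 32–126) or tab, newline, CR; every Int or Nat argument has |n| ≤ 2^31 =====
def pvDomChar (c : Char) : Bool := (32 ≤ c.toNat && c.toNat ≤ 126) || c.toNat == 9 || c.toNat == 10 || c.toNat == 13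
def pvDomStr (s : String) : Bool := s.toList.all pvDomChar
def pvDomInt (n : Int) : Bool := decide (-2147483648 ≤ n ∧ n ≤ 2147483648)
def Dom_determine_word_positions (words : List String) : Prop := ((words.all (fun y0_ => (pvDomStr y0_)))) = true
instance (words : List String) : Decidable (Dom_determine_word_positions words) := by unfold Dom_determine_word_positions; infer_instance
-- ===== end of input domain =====

-- B replaces A's two accumulation loops + defaultdict with one comprehension over the sorted distinct words (idiomatic; same return value).

-- ===== PORT A =====
-- A's two loops: enumeration with an explicit counter, then a defaultdict(list) append loop
def determine_word_positions (words : List String) : List (String × List Int) :=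
  let keyword_positions :=
    (words.foldl (fun (st : List (String × Int) × Int) word =>
      (st.1 ++ [(word, st.2)], st.2 + 1)) ([], 1)).1
  let term_positions :=
    keyword_positions.foldl (fun (d : PySem.Dict String (List Int)) p =>
      d.modify p.1 [] (fun l => l ++ [p.2])) PySem.Dict.empty
  -- dict keys are pairwise distinct, so Python's tuple sort on items() compares only the word:
  -- sorted(term_positions.items()) is exactly the stable sort by first component
  PySem.List.sorted term_positions.items (fun p => p.1) false

-- ===== PORT B =====
def determine_word_positions_alt (words : List String) : List (String × List Int) :=
  (PySem.List.sorted (PySem.Set.ofList words) (fun w => w) false).map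
    (fun w => (w, ((PySem.List.enumerate words 1).filter (fun p => p.2 == w)).map (fun p => p.1)))

-- ===== PRECONDITION & SPEC =====
def Spec_determine_word_positions (words : List String) (out : List (String × List Int)) : Prop := out = determine_word_positions_alt words
instance (words : List String) (out : List (String × List Int)) : Decidable (Spec_determine_word_positions words out) := by unfold Spec_determine_word_positions; infer_instance

-- ===== CLAIM (what is proved, stated in full; the proofs are below) =====
def Claim_equal_determine_word_positions : Prop := ∀ (words : List String), Dom_determine_word_positions words → Spec_determine_word_positions words (determine_word_positions words)

-- ===== LEMMAS AND PROOFS =====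

-- abbreviations for the intermediate values of A's loops (proof-only helpers)
def kpOf (words : List String) : List (String × Int) :=
  (PySem.List.enumerate words 1).map (fun p => (p.2, p.1))

def tpOf (words : List String) : PySem.Dict String (List Int) :=
  (kpOf words).foldl (fun (d : PySem.Dict String (List Int)) p =>
      d.modify p.1 [] (fun l => l ++ [p.2])) PySem.Dict.empty

def posOf (words : List String) (w : String) : List Int :=
  ((PySem.List.enumerate words 1).filter (fun p => p.2 == w)).map (fun p => p.1)

-- A's first loop is enumerate with swapped components
theorem foldl_kp (words : List String) (st : List (String × Int)) (c : Int) :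
    (words.foldl (fun (st : List (String × Int) × Int) word =>
      (st.1 ++ [(word, st.2)], st.2 + 1)) (st, c)).1
    = st ++ (PySem.List.enumerate words c).map (fun p => (p.2, p.1)) := by
  induction words generalizing st c with
  | nil => simp [PySem.List.enumerate_nil]
  | cons w ws ih => simp [PySem.List.enumerate_cons, ih]

theorem kp_map_fst (words : List String) : (kpOf words).map (·.1) = words := by
  simp [kpOf, List.map_map, Function.comp_def]

-- the dict's keys are the distinct words, in first-occurrence order
theorem tp_keys (words : List String) : (tpOf words).keys = PySem.Set.ofList words := by
  unfold tpOf
  rw [PySem.Dict.keys_foldl_modify_key]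
  rw [show (PySem.Dict.empty : PySem.Dict String (List Int)).keys = ([] : List String) from rfl,
     show (kpOf words).map Prod.fst = words from kp_map_fst words]
  rfl

theorem tp_nodup (words : List String) : (tpOf words).keys.Nodup := by
  apply PySem.Dict.nodup_keys_foldl_modify_key
  simp [PySem.Dict.empty]

-- the dict's value at w is exactly B's comprehension for w
theorem tp_getD (words : List String) (w : String) :
    (tpOf words).getD w [] = posOf words w := by
  unfold tpOf posOf
  rw [PySem.Dict.getD_foldl_modify_append]
  simp [kpOf, List.filter_map, Function.comp_def, List.map_map]

theorem tp_items (words : List String) :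
    (tpOf words).items = (PySem.Set.ofList words).map (fun w => (w, posOf words w)) := by
  rw [PySem.Dict.items_eq_map_keys (tpOf words) (tp_nodup words) []]
  rw [tp_keys]
  exact List.map_congr_left (fun w _ => by rw [tp_getD])

-- sorting the items by key = mapping the value function over the sorted distinct words
theorem determine_word_positions_eq (words : List String) :
    determine_word_positions words = determine_word_positions_alt words := by
  unfold determine_word_positions determine_word_positions_alt
  rw [foldl_kp]
  simp only [List.nil_append]
  rw [show (PySem.List.enumerate words 1).map (fun p => (p.2, p.1)) = kpOf words from rfl]
  rw [show ((kpOf words).foldl (fun (d : PySem.Dict String (List Int)) p =>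
      d.modify p.1 [] (fun l => l ++ [p.2])) PySem.Dict.empty) = tpOf words from rfl]
  rw [tp_items]
  apply PySem.List.sorted_eq_of_perm_of_pairwise_lt
  · exact ((PySem.List.sorted_perm _ _ _).map _)
  · have h := PySem.List.sorted_ofList_pairwise_lt (xs := words)
    exact (List.pairwise_map.mpr (by simpa using h))

-- ===== VERDICT (by name: the statement is the Claim_ definition above) =====
theorem determine_word_positions_spec : Claim_equal_determine_word_positions := by
  intro words _
  exact determine_word_positions_eq words
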